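-- pv_equiv track=rewrite | github.com/Pramit356/AES | venv/model/train_lstm.py | form_sentences
-- ===== SOURCE A (Python) =====
-- def convert_to_list(each_essay):
--     essay_list = []
--     word=''
--     start = False
--     for letter in each_essay:
--         if letter == "'":
--             if start == False:
--                 start = True
--             else:
--                 start = False
--                 essay_list.append(word)
--                 word = ''
--         elif letter not in ['[', ']', ',', ' ', '']:
--              word+=letter
--     return essay_list
--
-- def form_sentences(essays):
--     essay_mat = []
--     for each_essay in essays:
--         sentences = []
--         temp = []
--         ct = 0
--         essay = convert_to_list(each_essay)
--         for word in essay: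
--             if word in ['.', '?', '!']:
--                 if word != '!' or ( word=='!' and ct>=3):
--                     sentences.append(temp)
--                     temp = []
--             else:
--                 temp.append(word)
--                 ct+=1
--         essay_mat.append(sentences)
--     return essay_mat
-- ===== SOURCE B (Python) =====
-- def _essay_sentences(each_essay):
--     # single-pass character state machine: stream tokens straight into sentences
--     sentences = []
--     temp = []
--     ct = 0
--     word = ''
--     in_quote = False
--     for ch in each_essay:
--         if ch == "'":
--             if in_quote:
--                 if word in ('.', '?', '!'):
--                     if word != '!' or ct >= 3:
--                         sentences.append(temp)
--                         temp = []
--                 else: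
--                     temp.append(word)
--                     ct += 1
--                 word = ''
--                 in_quote = False
--             else:
--                 in_quote = True
--         elif ch not in ('[', ']', ',', ' '):
--             word += ch
--     return sentences
--
-- def form_sentences(essays):
--     return [_essay_sentences(e) for e in essays]
-- ===== Notes on version B (the rewrite author's own statement) =====
-- stated objective: alternative
-- what changed: B replaces A's two passes per essay (first build the full quote-delimited word list, then group words into sentences) with a single character-level state machine that streams each completed quoted token straight into the sentence accumulator, eliminating the intermediate word list.
import Mathlib
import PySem

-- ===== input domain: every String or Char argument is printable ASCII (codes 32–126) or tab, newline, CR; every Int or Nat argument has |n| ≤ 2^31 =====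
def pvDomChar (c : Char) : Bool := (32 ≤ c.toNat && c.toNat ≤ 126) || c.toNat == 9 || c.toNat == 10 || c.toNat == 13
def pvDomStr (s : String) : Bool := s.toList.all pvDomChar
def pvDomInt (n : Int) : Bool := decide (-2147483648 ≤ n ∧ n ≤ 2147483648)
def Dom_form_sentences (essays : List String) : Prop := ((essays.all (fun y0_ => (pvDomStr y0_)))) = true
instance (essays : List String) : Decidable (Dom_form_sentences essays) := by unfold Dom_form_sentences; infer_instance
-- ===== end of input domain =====

-- B fuses A's two passes (quote-token extraction, then sentence grouping) into one
-- character-level state machine per essay; objective: simpler single-pass decomposition.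


-- ===== PORT A =====
-- one step of convert_to_list's letter loop; state = (essay_list, word, start)
def ctlStep (st : List String × String × Bool) (letter : Char) : List String × String × Bool :=
  match st with
  | (lst, word, start) =>
    if letter = '\'' then
      if start = false then (lst, word, true)
      else (lst ++ [word], "", false)
    else if letter = '[' ∨ letter = ']' ∨ letter = ',' ∨ letter = ' ' then (lst, word, start)
    else (lst, word.push letter, start)

def convert_to_list (each_essay : String) : List String :=
  (each_essay.toList.foldl ctlStep ([], "", false)).1

-- one step of the word loop; state = (sentences, temp, ct)
def sentStep (st : List (List String) × List String × Int) (word : String) :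
    List (List String) × List String × Int :=
  match st with
  | (sentences, temp, ct) =>
    if word = "." ∨ word = "?" ∨ word = "!" then
      if word ≠ "!" ∨ (word = "!" ∧ ct ≥ 3) then (sentences ++ [temp], [], ct)
      else (sentences, temp, ct)
    else (sentences, temp ++ [word], ct + 1)

def form_sentences (essays : List String) : List (List (List String)) :=
  essays.foldl (fun essay_mat each_essay =>
    essay_mat ++ [((convert_to_list each_essay).foldl sentStep ([], [], 0)).1]) []

-- ===== PORT B =====
-- fused step; state = (sentences, temp, ct, word, in_quote)
def altStep (st : List (List String) × List String × Int × String × Bool) (ch : Char) :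
    List (List String) × List String × Int × String × Bool :=
  match st with
  | (sentences, temp, ct, word, inq) =>
    if ch = '\'' then
      if inq then
        if word = "." ∨ word = "?" ∨ word = "!" then
          if word ≠ "!" ∨ ct ≥ 3 then (sentences ++ [temp], [], ct, "", false)
          else (sentences, temp, ct, "", false)
        else (sentences, temp ++ [word], ct + 1, "", false)
      else (sentences, temp, ct, word, true)
    else if ch = '[' ∨ ch = ']' ∨ ch = ',' ∨ ch = ' ' then (sentences, temp, ct, word, inq)
    else (sentences, temp, ct, word.push ch, inq)

def essaySentences (each_essay : String) : List (List String) :=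
  (each_essay.toList.foldl altStep ([], [], 0, "", false)).1

def form_sentences_alt (essays : List String) : List (List (List String)) :=
  essays.map essaySentences

-- ===== PRECONDITION & SPEC =====
def Spec_form_sentences (essays : List String) (out : List (List (List String))) : Prop := out = form_sentences_alt essays
instance (essays : List String) (out : List (List (List String))) : Decidable (Spec_form_sentences essays out) := by unfold Spec_form_sentences; infer_instance

-- ===== CLAIM (what is proved, stated in full; the proofs are below) =====
def Claim_equal_form_sentences : Prop := ∀ (essays : List String), Dom_form_sentences essays → Spec_form_sentences essays (form_sentences essays)

-- ===== LEMMAS AND PROOFS =====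

-- step-evaluation lemmas (keep foldl's function opaque while reducing the head step)
theorem ctlStep_qf (lst : List String) (word : String) :
    ctlStep (lst, word, false) '\'' = (lst, word, true) := rfl

theorem ctlStep_qt (lst : List String) (word : String) :
    ctlStep (lst, word, true) '\'' = (lst ++ [word], "", false) := rfl

theorem ctlStep_skip {c : Char} (h : ¬ c = '\'')
    (hs : c = '[' ∨ c = ']' ∨ c = ',' ∨ c = ' ')
    (lst : List String) (word : String) (start : Bool) :
    ctlStep (lst, word, start) c = (lst, word, start) := by
  simp [ctlStep, h, hs]

theorem ctlStep_other {c : Char} (h : ¬ c = '\'')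
    (hs : ¬ (c = '[' ∨ c = ']' ∨ c = ',' ∨ c = ' '))
    (lst : List String) (word : String) (start : Bool) :
    ctlStep (lst, word, start) c = (lst, word.push c, start) := by
  simp [ctlStep, h, hs]

theorem sentStep_split {w : String} (hp : w = "." ∨ w = "?" ∨ w = "!")
    (hb : w ≠ "!" ∨ (w = "!" ∧ ct ≥ (3:Int)))
    (s : List (List String)) (t : List String) :
    sentStep (s, t, ct) w = (s ++ [t], [], ct) := by
  simp only [sentStep]; rw [if_pos hp, if_pos hb]

theorem sentStep_nosplit {w : String} (hp : w = "." ∨ w = "?" ∨ w = "!")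
    (hb : ¬ (w ≠ "!" ∨ (w = "!" ∧ ct ≥ (3:Int))))
    (s : List (List String)) (t : List String) :
    sentStep (s, t, ct) w = (s, t, ct) := by
  simp only [sentStep]; rw [if_pos hp, if_neg hb]

theorem sentStep_word {w : String} (hp : ¬ (w = "." ∨ w = "?" ∨ w = "!"))
    (s : List (List String)) (t : List String) (ct : Int) :
    sentStep (s, t, ct) w = (s, t ++ [w], ct + 1) := by
  simp only [sentStep]; rw [if_neg hp]

theorem altStep_qf (s : List (List String)) (t : List String) (ct : Int) (w : String) :
    altStep (s, t, ct, w, false) '\'' = (s, t, ct, w, true) := rfl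

theorem altStep_qt_split {w : String} (hp : w = "." ∨ w = "?" ∨ w = "!")
    (hb : w ≠ "!" ∨ ct ≥ (3:Int)) (s : List (List String)) (t : List String) :
    altStep (s, t, ct, w, true) '\'' = (s ++ [t], [], ct, "", false) := by
  simp [altStep, hp, hb]

theorem altStep_qt_nosplit {w : String} (hp : w = "." ∨ w = "?" ∨ w = "!")
    (hb : ¬ (w ≠ "!" ∨ ct ≥ (3:Int))) (s : List (List String)) (t : List String) :
    altStep (s, t, ct, w, true) '\'' = (s, t, ct, "", false) := by
  simp only [altStep, if_true]
  rw [if_pos hp, if_neg hb]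

theorem altStep_qt_word {w : String} (hp : ¬ (w = "." ∨ w = "?" ∨ w = "!"))
    (s : List (List String)) (t : List String) (ct : Int) :
    altStep (s, t, ct, w, true) '\'' = (s, t ++ [w], ct + 1, "", false) := by
  simp only [altStep, if_true]
  rw [if_neg hp]

theorem altStep_skip {c : Char} (h : ¬ c = '\'')
    (hs : c = '[' ∨ c = ']' ∨ c = ',' ∨ c = ' ')
    (s : List (List String)) (t : List String) (ct : Int) (w : String) (q : Bool) :
    altStep (s, t, ct, w, q) c = (s, t, ct, w, q) := by
  simp [altStep, h, hs]

theorem altStep_other {c : Char} (h : ¬ c = '\'')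
    (hs : ¬ (c = '[' ∨ c = ']' ∨ c = ',' ∨ c = ' '))
    (s : List (List String)) (t : List String) (ct : Int) (w : String) (q : Bool) :
    altStep (s, t, ct, w, q) c = (s, t, ct, w.push c, q) := by
  simp [altStep, h, hs]

-- ctlStep's accumulator is a prefix: it can be factored out of the fold
theorem ctl_acc (cs : List Char) : ∀ (lst : List String) (word : String) (start : Bool),
    cs.foldl ctlStep (lst, word, start) =
      (lst ++ (cs.foldl ctlStep ([], word, start)).1,
       (cs.foldl ctlStep ([], word, start)).2) := by
  induction cs with
  | nil => intro lst word start; simp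
  | cons c cs ih =>
    intro lst word start
    simp only [List.foldl_cons]
    by_cases h1 : c = '\''
    · subst h1
      cases start with
      | false => rw [ctlStep_qf, ctlStep_qf, ih lst]
      | true =>
        rw [ctlStep_qt, ctlStep_qt]
        simp only [List.nil_append]
        rw [ih (lst ++ [word]), ih [word]]
        simp
    · by_cases h2 : c = '[' ∨ c = ']' ∨ c = ',' ∨ c = ' '
      · rw [ctlStep_skip h1 h2, ctlStep_skip h1 h2]; exact ih lst word start
      · rw [ctlStep_other h1 h2, ctlStep_other h1 h2]; exact ih lst (word.push c) start

-- fold fusion: the fused B step equals sentence-folding the words A's first pass emits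
theorem fuse (cs : List Char) :
    ∀ (sents : List (List String)) (temp : List String) (ct : Int) (word : String) (start : Bool),
    cs.foldl altStep (sents, temp, ct, word, start) =
      (((cs.foldl ctlStep ([], word, start)).1.foldl sentStep (sents, temp, ct)).1,
       ((cs.foldl ctlStep ([], word, start)).1.foldl sentStep (sents, temp, ct)).2.1,
       ((cs.foldl ctlStep ([], word, start)).1.foldl sentStep (sents, temp, ct)).2.2,
       (cs.foldl ctlStep ([], word, start)).2.1,
       (cs.foldl ctlStep ([], word, start)).2.2) := by
  induction cs with
  | nil => intro sents temp ct word start; simp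
  | cons c cs ih =>
    intro sents temp ct word start
    simp only [List.foldl_cons]
    by_cases hq : c = '\''
    · subst hq
      cases start with
      | false => rw [ctlStep_qf, altStep_qf]; exact ih sents temp ct word true
      | true =>
        rw [ctlStep_qt]
        simp only [List.nil_append]
        rw [ctl_acc cs [word]]
        simp only [List.singleton_append, List.foldl_cons]
        by_cases hp : word = "." ∨ word = "?" ∨ word = "!"
        · by_cases hb : word ≠ "!" ∨ (3:Int) ≤ ct
          · rw [altStep_qt_split hp hb,
              sentStep_split hp (by
                rcases hb with hb | hb
                · exact Or.inl hb
                · by_cases hw : word = "!"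
                  · exact Or.inr ⟨hw, hb⟩
                  · exact Or.inl hw)]
            exact ih (sents ++ [temp]) [] ct "" false
          · rw [altStep_qt_nosplit hp hb,
              sentStep_nosplit hp (by
                push Not at hb
                rintro (hne | ⟨_, hge⟩)
                · exact hne hb.1
                · exact absurd hb.2 (by omega))]
            exact ih sents temp ct "" false
        · rw [altStep_qt_word hp, sentStep_word hp]
          exact ih sents (temp ++ [word]) (ct + 1) "" false
    · by_cases hs : c = '[' ∨ c = ']' ∨ c = ',' ∨ c = ' '
      · rw [ctlStep_skip hq hs, altStep_skip hq hs]; exact ih sents temp ct word start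
      · rw [ctlStep_other hq hs, altStep_other hq hs]
        exact ih sents temp ct (word.push c) start

theorem essay_eq (e : String) :
    ((convert_to_list e).foldl sentStep ([], [], 0)).1 = essaySentences e := by
  unfold convert_to_list essaySentences
  rw [fuse e.toList [] [] 0 "" false]

theorem foldl_app_map (f : String → List (List String)) (es : List String) :
    ∀ acc : List (List (List String)),
      es.foldl (fun m e => m ++ [f e]) acc = acc ++ es.map f := by
  induction es with
  | nil => intro acc; simp
  | cons e es ih => intro acc; simp [ih]

-- ===== VERDICT (by name: the statement is the Claim_ definition above) =====
theorem form_sentences_spec : Claim_equal_form_sentences := by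
  intro essays _
  unfold Spec_form_sentences form_sentences form_sentences_alt
  rw [foldl_app_map]
  simp [essay_eq]
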